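-- pv_equiv track=rewrite | github.com/nischala342/AlgorithmVisualiser | quickSort.py | getColorArray
-- ===== SOURCE A (Python) =====
-- def getColorArray(datalen,low,high,i,currentindex,isSwapping = False):
-- 	colorArray = []
-- 	for j in range(datalen):
-- 		if j >= low and j <= high:
-- 			colorArray.append('grey')
-- 		else:
-- 			colorArray.append('white')
-- 		if j == high:
-- 			colorArray[j] = 'blue'
-- 		elif j == i:
-- 			colorArray[j] = 'red'
-- 		elif j == currentindex:
-- 			colorArray[j] = 'yellow'
--
-- 		if isSwapping:
-- 			if j == i or j == currentindex:
-- 				colorArray[j] = 'green'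
-- 	return colorArray
-- ===== SOURCE B (Python) =====
-- def getColorArray(datalen, low, high, i, currentindex, isSwapping=False):
--     n = max(datalen, 0)
--     arr = ['white'] * n
--     lo = max(low, 0)
--     hi = min(high, n - 1)
--     if lo <= hi:
--         arr[lo:hi + 1] = ['grey'] * (hi - lo + 1)
--     for idx, c in ((currentindex, 'yellow'), (i, 'red'), (high, 'blue')):
--         if 0 <= idx < n:
--             arr[idx] = c
--     if isSwapping:
--         for idx in (i, currentindex):
--             if 0 <= idx < n:
--                 arr[idx] = 'green'
--     return arr
-- ===== Notes on version B (the rewrite author's own statement) =====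
-- stated objective: simpler
-- what changed: Replaces the per-element loop with its if/elif chain by bulk init ['white']*n, one clamped slice assignment for the grey band, and O(1) guarded targeted writes in priority order (yellow, red, blue, then green).
import Mathlib
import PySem

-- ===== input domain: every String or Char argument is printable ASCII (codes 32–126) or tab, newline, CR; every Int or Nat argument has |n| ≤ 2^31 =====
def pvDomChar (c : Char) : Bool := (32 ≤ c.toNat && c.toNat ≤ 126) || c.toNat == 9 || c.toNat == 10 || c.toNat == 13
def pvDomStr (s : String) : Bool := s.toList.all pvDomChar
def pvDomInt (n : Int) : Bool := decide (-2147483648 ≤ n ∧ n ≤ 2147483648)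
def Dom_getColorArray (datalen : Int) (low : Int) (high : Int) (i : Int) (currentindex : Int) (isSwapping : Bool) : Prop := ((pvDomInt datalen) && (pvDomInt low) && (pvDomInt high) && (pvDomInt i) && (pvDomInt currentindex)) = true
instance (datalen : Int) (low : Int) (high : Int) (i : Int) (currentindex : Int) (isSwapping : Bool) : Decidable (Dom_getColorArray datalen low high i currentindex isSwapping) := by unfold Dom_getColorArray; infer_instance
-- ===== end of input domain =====

-- B replaces the per-element if/elif loop by bulk 'white' init, one clamped grey slice
-- assignment and guarded targeted writes in priority order (objective: simpler).

-- ===== PORT A =====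
-- loop 'for j in range(datalen)' appending then mutating colorArray[j]; j ≥ 0 and
-- j < length inside the loop, so '.set j.toNat' is exact for 'colorArray[j] = …'.
def getColorArray (datalen : Int) (low : Int) (high : Int) (i : Int) (currentindex : Int) (isSwapping : Bool) : List String :=
  (PySem.List.pyRange 0 datalen 1).foldl (fun colorArray j =>
    let colorArray := colorArray ++ [if low ≤ j ∧ j ≤ high then "grey" else "white"]
    let colorArray :=
      if j = high then colorArray.set j.toNat "blue"
      else if j = i then colorArray.set j.toNat "red"
      else if j = currentindex then colorArray.set j.toNat "yellow"
      else colorArray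
    if isSwapping then
      (if j = i ∨ j = currentindex then colorArray.set j.toNat "green" else colorArray)
    else colorArray) []

-- ===== PORT B =====
-- 'arr[lo:hi+1] = ["grey"]*k' (0 ≤ lo ≤ hi < n) is exactly take ++ replicate ++ drop;
-- each guarded 'arr[idx] = c' (0 ≤ idx < n) is '.set idx.toNat c'.
def getColorArray_alt (datalen : Int) (low : Int) (high : Int) (i : Int) (currentindex : Int) (isSwapping : Bool) : List String :=
  let n := max datalen 0
  let arr := List.replicate n.toNat "white"
  let lo := max low 0
  let hi := min high (n - 1)
  let arr := if lo ≤ hi then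
      arr.take lo.toNat ++ List.replicate (hi - lo + 1).toNat "grey" ++ arr.drop (hi + 1).toNat
    else arr
  let arr := [(currentindex, "yellow"), (i, "red"), (high, "blue")].foldl
      (fun arr p => if 0 ≤ p.1 ∧ p.1 < n then arr.set p.1.toNat p.2 else arr) arr
  if isSwapping then
    [i, currentindex].foldl (fun arr idx => if 0 ≤ idx ∧ idx < n then arr.set idx.toNat "green" else arr) arr
  else arr

-- ===== PRECONDITION & SPEC =====
def Spec_getColorArray (datalen : Int) (low : Int) (high : Int) (i : Int) (currentindex : Int) (isSwapping : Bool) (out : List String) : Prop := out = getColorArray_alt datalen low high i currentindex isSwapping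
instance (datalen : Int) (low : Int) (high : Int) (i : Int) (currentindex : Int) (isSwapping : Bool) (out : List String) : Decidable (Spec_getColorArray datalen low high i currentindex isSwapping out) := by unfold Spec_getColorArray; infer_instance

-- ===== CLAIM (what is proved, stated in full; the proofs are below) =====
def Claim_equal_getColorArray : Prop := ∀ (datalen : Int) (low : Int) (high : Int) (i : Int) (currentindex : Int) (isSwapping : Bool), Dom_getColorArray datalen low high i currentindex isSwapping → Spec_getColorArray datalen low high i currentindex isSwapping (getColorArray datalen low high i currentindex isSwapping)

-- ===== LEMMAS AND PROOFS =====

-- the final colour of index j, read off A's branch priorities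
def pvColor (low high i currentindex : Int) (isSwapping : Bool) (j : Int) : String :=
  if isSwapping ∧ (j = i ∨ j = currentindex) then "green"
  else if j = high then "blue"
  else if j = i then "red"
  else if j = currentindex then "yellow"
  else if low ≤ j ∧ j ≤ high then "grey"
  else "white"

lemma set_append_last (acc : List String) (a b : String) :
    (acc ++ [a]).set acc.length b = acc ++ [b] := by
  simp


lemma A_step (low high i currentindex : Int) (isSwapping : Bool) (acc : List String)
    (j : Int) (hl : acc.length = j.toNat) :
    (let c1 := acc ++ [if low ≤ j ∧ j ≤ high then "grey" else "white"]
     let c2 := if j = high then c1.set j.toNat "blue"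
       else if j = i then c1.set j.toNat "red"
       else if j = currentindex then c1.set j.toNat "yellow"
       else c1
     if isSwapping then
       (if j = i ∨ j = currentindex then c2.set j.toNat "green" else c2)
     else c2)
      = acc ++ [pvColor low high i currentindex isSwapping j] := by
  have hs : ∀ a b : String, (acc ++ [a]).set j.toNat b = acc ++ [b] := by
    intro a b; rw [← hl]; exact set_append_last acc a b
  cases isSwapping <;> split_ifs <;> simp_all [pvColor]

lemma A_eq_map_nat (low high i currentindex : Int) (isSwapping : Bool) (n : Nat) :
    getColorArray (n : Int) low high i currentindex isSwapping
      = (PySem.List.pyRange 0 (n : Int) 1).map (pvColor low high i currentindex isSwapping) := by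
  induction n with
  | zero => simp [getColorArray, PySem.List.pyRange_one_eq_nil]
  | succ n ih =>
    have hcast : ((n + 1 : Nat) : Int) = (n : Int) + 1 := by push_cast; ring
    have hr : PySem.List.pyRange 0 ((n : Int) + 1) 1
        = PySem.List.pyRange 0 (n : Int) 1 ++ [(n : Int)] :=
      PySem.List.pyRange_one_succ_right (by positivity)
    unfold getColorArray at ih ⊢
    rw [hcast, hr, List.foldl_append, List.map_append, ih]
    refine A_step low high i currentindex isSwapping _ (n : Int) ?_
    simp [PySem.List.length_pyRange_one]

lemma A_eq_map (datalen low high i currentindex : Int) (isSwapping : Bool) :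
    getColorArray datalen low high i currentindex isSwapping
      = (PySem.List.pyRange 0 datalen 1).map (pvColor low high i currentindex isSwapping) := by
  by_cases hd : datalen ≤ 0
  · simp [getColorArray, PySem.List.pyRange_one_eq_nil hd]
  · have : datalen = (datalen.toNat : Int) := by omega
    rw [this]; exact A_eq_map_nat low high i currentindex isSwapping datalen.toNat

lemma map_range_set (d m : Int) (f : Int → String) (c : String) (h0 : 0 ≤ m) (hm : m < d) :
    ((PySem.List.pyRange 0 d 1).map f).set m.toNat c
      = (PySem.List.pyRange 0 d 1).map (fun j => if j = m then c else f j) := by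
  apply List.ext_getElem
  · simp
  · intro k hk1 hk2
    simp only [List.length_set, List.length_map, PySem.List.length_pyRange_one] at hk1
    simp only [List.getElem_set, List.getElem_map, PySem.List.getElem_pyRange_one]
    split_ifs <;> first | rfl | (exfalso; omega)

lemma guarded_set (d m : Int) (f : Int → String) (c : String) :
    (if 0 ≤ m ∧ m < max d 0 then ((PySem.List.pyRange 0 d 1).map f).set m.toNat c
      else (PySem.List.pyRange 0 d 1).map f)
      = (PySem.List.pyRange 0 d 1).map (fun j => if j = m then c else f j) := by
  split_ifs with h
  · exact map_range_set d m f c h.1 (by omega)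
  · symm
    apply List.map_congr_left
    intro j hj
    rw [PySem.List.mem_pyRange_one] at hj
    split_ifs <;> first | rfl | (exfalso; omega)

lemma grey_band (d low high : Int) :
    (if max low 0 ≤ min high (max d 0 - 1) then
        (List.replicate (max d 0).toNat "white").take (max low 0).toNat ++
          List.replicate (min high (max d 0 - 1) - max low 0 + 1).toNat "grey" ++
          (List.replicate (max d 0).toNat "white").drop (min high (max d 0 - 1) + 1).toNat
      else List.replicate (max d 0).toNat "white")
      = (PySem.List.pyRange 0 d 1).map (fun j => if low ≤ j ∧ j ≤ high then "grey" else "white") := by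
  split_ifs with hb
  · apply List.ext_getElem
    · simp only [List.length_append, List.take_replicate, List.drop_replicate,
        List.length_replicate, List.length_map, PySem.List.length_pyRange_one]
      omega
    · intro k hk1 hk2
      simp only [List.length_map, PySem.List.length_pyRange_one] at hk2
      simp only [List.take_replicate, List.drop_replicate, List.getElem_append,
        List.getElem_replicate, List.length_replicate, List.length_append,
        List.getElem_map, PySem.List.getElem_pyRange_one]
      split_ifs <;> first | rfl | (exfalso; omega)
  · apply List.ext_getElem
    · simp only [List.length_replicate, List.length_map, PySem.List.length_pyRange_one]
      omega
    · intro k hk1 hk2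
      simp only [List.length_replicate] at hk1
      simp only [List.getElem_replicate, List.getElem_map, PySem.List.getElem_pyRange_one]
      split_ifs <;> first | rfl | (exfalso; omega)

lemma B_eq_map (datalen low high i currentindex : Int) (isSwapping : Bool) :
    getColorArray_alt datalen low high i currentindex isSwapping
      = (PySem.List.pyRange 0 datalen 1).map (pvColor low high i currentindex isSwapping) := by
  unfold getColorArray_alt
  simp only [List.foldl]
  rw [grey_band, guarded_set, guarded_set, guarded_set]
  cases isSwapping
  · simp only [Bool.false_eq_true, if_false]
    apply List.map_congr_left
    intro j hj
    rw [PySem.List.mem_pyRange_one] at hj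
    simp only [pvColor, Bool.false_eq_true, false_and, if_false]
  · simp only [if_true]
    rw [guarded_set, guarded_set]
    apply List.map_congr_left
    intro j hj
    rw [PySem.List.mem_pyRange_one] at hj
    simp only [pvColor, true_and]
    split_ifs <;> first | rfl | (exfalso; omega)

-- ===== VERDICT (by name: the statement is the Claim_ definition above) =====
theorem getColorArray_spec : Claim_equal_getColorArray := by
  intro d l h i c s _
  unfold Spec_getColorArray
  rw [A_eq_map, B_eq_map]
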